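-- pv_equiv track=rewrite | github.com/apache/kafka | tests/kafkatest/tests/core/group_mode_transactions_test.py | split_by_partition
-- ===== SOURCE A (Python) =====
-- def split_by_partition(messages_consumed):
--     messages_by_partition = {}
--
--     for msg in messages_consumed:
--         partition = msg[1]
--         if partition not in messages_by_partition:
--             messages_by_partition[partition] = []
--         messages_by_partition[partition].append(msg[0])
--     return messages_by_partition
-- ===== SOURCE B (Python) =====
-- def split_by_partition(messages_consumed):
--     ordered_partitions = []
--     for _, partition in messages_consumed:
--         if partition not in ordered_partitions:
--             ordered_partitions.append(partition)
--     return {p: [value for value, q in messages_consumed if q == p]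
--             for p in ordered_partitions}
-- ===== Notes on version B (the rewrite author's own statement) =====
-- stated objective: alternative
-- what changed: Replaces A's single accumulation pass that mutates per-partition lists inside a dict with a two-phase pipeline: first collect the distinct partitions in first-seen order, then build the whole dict at once with a per-partition filter comprehension over the input.
import Mathlib
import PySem

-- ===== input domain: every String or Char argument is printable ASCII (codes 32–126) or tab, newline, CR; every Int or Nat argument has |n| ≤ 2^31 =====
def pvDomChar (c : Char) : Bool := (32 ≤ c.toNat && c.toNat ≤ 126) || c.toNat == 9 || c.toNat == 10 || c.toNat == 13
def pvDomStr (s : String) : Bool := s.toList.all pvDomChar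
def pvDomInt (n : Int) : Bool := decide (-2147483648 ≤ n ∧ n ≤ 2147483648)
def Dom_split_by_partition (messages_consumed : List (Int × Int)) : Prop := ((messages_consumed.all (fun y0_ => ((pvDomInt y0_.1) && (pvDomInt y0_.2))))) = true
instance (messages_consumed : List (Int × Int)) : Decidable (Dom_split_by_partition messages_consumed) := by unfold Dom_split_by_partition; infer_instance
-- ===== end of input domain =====

-- B replaces A's single dict-accumulation pass with a two-phase pipeline (distinct partitions
-- in first-seen order, then a filter per partition); alternative decomposition, same results.


-- ===== PORT A =====
def split_by_partition (messages_consumed : List (Int × Int)) : List (Int × List Int) :=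
  (messages_consumed.foldl
    (fun d msg =>
      let partition := msg.2
      let d := if d.contains partition then d else d.insert partition []
      d.modify partition [] (fun l => l ++ [msg.1]))
    PySem.Dict.empty).items

-- ===== PORT B =====
-- first pass of Source B: the distinct partitions in first-seen order
def pvSeen_split_by_partition (messages_consumed : List (Int × Int)) : List Int :=
  messages_consumed.foldl (fun s m => if m.2 ∈ s then s else s ++ [m.2]) []

def split_by_partition_alt (messages_consumed : List (Int × Int)) : List (Int × List Int) :=
  (pvSeen_split_by_partition messages_consumed).map
    (fun p => (p, (messages_consumed.filter (fun m => m.2 == p)).map (fun m => m.1)))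

-- ===== PRECONDITION & SPEC =====
def Spec_split_by_partition (messages_consumed : List (Int × Int)) (out : List (Int × List Int)) : Prop := out = split_by_partition_alt messages_consumed
instance (messages_consumed : List (Int × Int)) (out : List (Int × List Int)) : Decidable (Spec_split_by_partition messages_consumed out) := by unfold Spec_split_by_partition; infer_instance

-- ===== CLAIM (what is proved, stated in full; the proofs are below) =====
def Claim_equal_split_by_partition : Prop := ∀ (messages_consumed : List (Int × Int)), Dom_split_by_partition messages_consumed → Spec_split_by_partition messages_consumed (split_by_partition messages_consumed)

-- ===== LEMMAS AND PROOFS =====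

-- A's loop body (setdefault-then-append) is one dict "modify" step
theorem pv_step_eq_modify (d : PySem.Dict Int (List Int)) (m : Int × Int) :
    (let d' := if d.contains m.2 then d else d.insert m.2 []
     d'.modify m.2 [] (fun l => l ++ [m.1])) = d.modify m.2 [] (fun l => l ++ [m.1]) := by
  by_cases h : d.contains m.2
  · simp [h]
  · have hc : d.contains m.2 = false := by simpa using h
    simp [PySem.Dict.modify, PySem.Dict.getD_insert_self,
      PySem.Dict.insert_insert_self, PySem.Dict.getD_of_not_contains, hc]

-- A's whole loop is the plain modify-fold
theorem pvA_eq_modify_fold (ms : List (Int × Int)) :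
    split_by_partition ms =
      (ms.foldl (fun d m => d.modify m.2 [] (fun l => l ++ [m.1])) PySem.Dict.empty).items := by
  unfold split_by_partition
  congr 1
  apply PySem.List.foldl_congr_mem
  intro d m _
  exact pv_step_eq_modify d m

-- B's first pass is set(map snd) in first-insertion order
theorem pvSeen_eq_ofList (ms : List (Int × Int)) :
    pvSeen_split_by_partition ms = PySem.Set.ofList (ms.map (fun m => m.2)) := by
  unfold pvSeen_split_by_partition
  rw [← PySem.Set.update_nil_left (xs := ms.map (fun m : Int × Int => m.2)),
    PySem.Set.update_map_eq_foldl_add]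
  apply PySem.List.foldl_congr_mem
  intro s m _
  exact (PySem.Set.add_eq_ite s m.2).symm

-- ===== VERDICT (by name: the statement is the Claim_ definition above) =====
theorem split_by_partition_spec : Claim_equal_split_by_partition := by
  intro ms _
  unfold Spec_split_by_partition split_by_partition_alt
  rw [pvA_eq_modify_fold, pvSeen_eq_ofList]
  have hkeys : (ms.foldl (fun d m => d.modify m.2 [] (fun l => l ++ [m.1]))
      (PySem.Dict.empty : PySem.Dict Int (List Int))).keys
      = PySem.Set.ofList (ms.map (fun m => m.2)) := by
    rw [PySem.Dict.keys_foldl_modify_key]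
    simp only [PySem.Dict.keys_empty]
    rw [PySem.Set.update_nil_left]
  have hnd : (ms.foldl (fun d m => d.modify m.2 [] (fun l => l ++ [m.1]))
      (PySem.Dict.empty : PySem.Dict Int (List Int))).keys.Nodup := by
    rw [hkeys]; exact PySem.Set.nodup_ofList _
  rw [PySem.Dict.items_eq_map_keys _ hnd ([] : List Int), hkeys]
  apply List.map_congr_left
  intro p _
  refine congrArg (fun v => (p, v)) ?_
  have := PySem.Dict.getD_foldl_modify_append (l := ms.map Prod.swap)
      (d := (PySem.Dict.empty : PySem.Dict Int (List Int))) (c := p)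
  rw [List.foldl_map] at this
  simp only [Prod.swap] at this
  rw [this]
  simp [PySem.Dict.getD_empty, List.filter_map, List.map_map, Function.comp_def]
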